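-- pv_equiv track=rewrite | github.com/arthexis/arthexis | apps/repos/pr_oversee.py | _looks_like_version_suffix
-- ===== SOURCE A (Python) =====
-- def _looks_like_version_suffix(value: str) -> bool:
--     normalized = value.strip().lstrip("vV")
--     allowed = set("abcdefghijklmnopqrstuvwxyzABCDEFGHIJKLMNOPQRSTUVWXYZ0123456789._-")
--     return (
--         bool(normalized)
--         and normalized[0].isdigit()
--         and "." in normalized
--         and all(character in allowed for character in normalized)
--     )
-- ===== SOURCE B (Python) =====
-- _ALLOWED_NO_DOT = "abcdefghijklmnopqrstuvwxyzABCDEFGHIJKLMNOPQRSTUVWXYZ0123456789_-"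
--
-- def _looks_like_version_suffix(value: str) -> bool:
--     # Split on dots and validate each dot-free segment instead of scanning
--     # the whole string char by char: >= 2 segments means a dot was present,
--     # and a segment is clean iff stripping the allowed chars empties it.
--     normalized = value.strip().lstrip("vV")
--     parts = normalized.split(".")
--     return (len(parts) >= 2
--             and normalized[:1].isdigit()
--             and all(part.strip(_ALLOWED_NO_DOT) == "" for part in parts))
-- ===== Notes on version B (the rewrite author's own statement) =====
-- stated objective: alternative
-- what changed: Replaces A's character-level membership scans (allowed-set construction, dot membership test, all-chars-in-set scan) with a split-on-dots decomposition: two or more segments certifies the dot requirement, and each dot-free segment is validated by stripping the allowed characters and requiring the remainder to be empty.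
import Mathlib
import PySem

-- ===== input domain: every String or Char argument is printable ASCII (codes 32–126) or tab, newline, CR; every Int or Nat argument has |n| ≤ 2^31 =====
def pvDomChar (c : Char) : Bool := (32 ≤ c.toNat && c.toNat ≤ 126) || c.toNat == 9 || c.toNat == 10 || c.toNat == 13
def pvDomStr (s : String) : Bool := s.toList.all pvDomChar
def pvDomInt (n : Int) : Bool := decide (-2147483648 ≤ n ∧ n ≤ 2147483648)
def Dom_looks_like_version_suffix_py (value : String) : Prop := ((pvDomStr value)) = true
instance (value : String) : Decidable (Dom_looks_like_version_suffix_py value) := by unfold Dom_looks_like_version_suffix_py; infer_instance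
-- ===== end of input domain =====

-- B validates by splitting on '.' into segments (≥2 segments = dot present, each segment must strip to empty over the allowed chars) instead of A's whole-string membership scans; objective: alternative decomposition, same cost.
set_option maxRecDepth 8000


-- ===== PORT A =====
-- lstrip("vV") has no PySem primitive; ported exactly as dropWhile over {'v','V'}.
def looks_like_version_suffix_py (value : String) : Bool :=
  let normalized :=
    (PySem.Chars.strip value.toList).dropWhile (fun c => c == 'v' || c == 'V')
  let allowed := PySem.Set.ofList
    "abcdefghijklmnopqrstuvwxyzABCDEFGHIJKLMNOPQRSTUVWXYZ0123456789._-".toList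
  !normalized.isEmpty
    && (match PySem.List.pyGet? normalized 0 with
        | some c => PySem.Chars.isdigit c
        | none => false)
    && normalized.contains '.'
    && normalized.all (fun character => allowed.contains character)

-- ===== PORT B =====
def pvAllowedNoDot : List Char :=
  "abcdefghijklmnopqrstuvwxyzABCDEFGHIJKLMNOPQRSTUVWXYZ0123456789_-".toList

-- Source B: split on '.', then per-segment strip-to-empty; normalized[:1] is List.take 1 (exact),
-- lstrip("vV") is dropWhile over {'v','V'} (exact).
def looks_like_version_suffix_py_alt (value : String) : Bool :=
  let normalized :=
    (PySem.Chars.strip value.toList).dropWhile (fun c => c == 'v' || c == 'V')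
  let parts := PySem.Chars.splitOn normalized ['.']
  decide (2 ≤ parts.length)
    && PySem.Chars.strIsdigit (normalized.take 1)
    && parts.all (fun part => PySem.Chars.stripChars part pvAllowedNoDot == [])

-- ===== PRECONDITION & SPEC =====
def Spec_looks_like_version_suffix_py (value : String) (out : Bool) : Prop := out = looks_like_version_suffix_py_alt value
instance (value : String) (out : Bool) : Decidable (Spec_looks_like_version_suffix_py value out) := by unfold Spec_looks_like_version_suffix_py; infer_instance

-- ===== CLAIM (what is proved, stated in full; the proofs are below) =====
def Claim_equal_looks_like_version_suffix_py : Prop := ∀ (value : String), Dom_looks_like_version_suffix_py value → Spec_looks_like_version_suffix_py value (looks_like_version_suffix_py value)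

-- ===== LEMMAS AND PROOFS =====

-- reference model of str.split('.') used only in the proofs
def pvPrepFirst (x : List Char) : List (List Char) → List (List Char)
  | [] => [x]
  | p :: ps => (x ++ p) :: ps

def pvSplitDot : List Char → List (List Char)
  | [] => [[]]
  | c :: rest => if c = '.' then [] :: pvSplitDot rest else pvPrepFirst [c] (pvSplitDot rest)

lemma pvSplitDot_ne_nil (cs : List Char) : pvSplitDot cs ≠ [] := by
  cases cs with
  | nil => simp [pvSplitDot]
  | cons c rest =>
    simp only [pvSplitDot]
    split
    · simp
    · cases h : pvSplitDot rest <;> simp [pvPrepFirst]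

lemma pv_go_spec (fuel : Nat) (l cur : List Char) (acc : List (List Char))
    (hf : l.length < fuel) :
    PySem.Chars.splitOn.go ['.'] fuel l cur acc
      = acc.reverse ++ pvPrepFirst cur.reverse (pvSplitDot l) := by
  induction fuel generalizing l cur acc with
  | zero => omega
  | succ fuel ih =>
    cases l with
    | nil =>
      simp [PySem.Chars.splitOn.go, pvSplitDot, pvPrepFirst]
    | cons c rest =>
      by_cases hc : c = '.'
      · subst hc
        have hpre : (['.'] : List Char).isPrefixOf ('.' :: rest) = true := by
          simp [List.isPrefixOf]
        rw [PySem.Chars.splitOn.go]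
        simp only [hpre, if_true, List.length_cons, List.length_nil, Nat.zero_add,
          List.drop_succ_cons, List.drop_zero] at *
        rw [ih rest [] (cur.reverse :: acc) (by omega)]
        cases h : pvSplitDot rest with
        | nil => exact absurd h (pvSplitDot_ne_nil rest)
        | cons p ps => simp [pvSplitDot, h, pvPrepFirst]
      · have hpre : (['.'] : List Char).isPrefixOf (c :: rest) = false := by
          simp [List.isPrefixOf, Ne.symm hc]
        rw [PySem.Chars.splitOn.go]
        simp only [hpre, Bool.false_eq_true, if_false] at *
        rw [ih rest (c :: cur) acc (by simp at hf ⊢; omega)]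
        cases h : pvSplitDot rest with
        | nil => exact absurd h (pvSplitDot_ne_nil rest)
        | cons p ps => simp [pvSplitDot, hc, h, pvPrepFirst]

lemma pv_splitOn_eq (cs : List Char) :
    PySem.Chars.splitOn cs ['.'] = pvSplitDot cs := by
  rw [PySem.Chars.splitOn, pv_go_spec (cs.length + 1) cs [] [] (by omega)]
  cases h : pvSplitDot cs with
  | nil => exact absurd h (pvSplitDot_ne_nil cs)
  | cons p ps => simp [pvPrepFirst]

-- ≥ 2 dot-segments ⟺ a dot occurs
lemma pv_length_splitDot (cs : List Char) :
    decide (2 ≤ (pvSplitDot cs).length) = cs.contains '.' := by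
  induction cs with
  | nil => simp [pvSplitDot]
  | cons c rest ih =>
    by_cases hc : c = '.'
    · subst hc
      have := List.length_pos_iff.mpr (pvSplitDot_ne_nil rest)
      simp only [pvSplitDot, if_true, List.length_cons, List.contains_cons]
      simp only [beq_self_eq_true, Bool.true_or]
      exact decide_eq_true (by omega)
    · simp only [pvSplitDot, hc, if_false, List.contains_cons]
      have hne : ('.' == c) = false := by simp [Ne.symm hc]
      rw [hne, Bool.false_or, ← ih]
      cases h : pvSplitDot rest with
      | nil => exact absurd h (pvSplitDot_ne_nil rest)
      | cons p ps => simp [pvPrepFirst]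

-- stripping the allowed chars empties a segment ⟺ every char is allowed
lemma pv_stripChars_empty (s chars : List Char) :
    (PySem.Chars.stripChars s chars == []) = s.all (fun c => chars.contains c) := by
  rw [PySem.Chars.stripChars, Bool.eq_iff_iff]
  rw [beq_iff_eq, List.reverse_eq_nil_iff, List.dropWhile_eq_nil_iff, List.all_eq_true]
  constructor
  · intro h x hx
    have hs : List.dropWhile (fun c => chars.contains c) s = [] := by
      cases hd : List.dropWhile (fun c => chars.contains c) s with
      | nil => rfl
      | cons y ys =>
        have hy := List.head?_dropWhile_not (fun c => chars.contains c) s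
        rw [hd] at hy
        have hmem : y ∈ (List.dropWhile (fun c => chars.contains c) s).reverse := by
          rw [hd]; simp
        have h2 := h y hmem
        rw [List.contains_eq_mem, decide_eq_true_iff] at h2
        simp [h2] at hy
    exact List.dropWhile_eq_nil_iff.mp hs x hx
  · intro h x hx
    have hs : List.dropWhile (fun c => chars.contains c) s = [] :=
      List.dropWhile_eq_nil_iff.mpr h
    rw [hs] at hx
    simp at hx

-- every segment clean over allowed-minus-dot ⟺ every char is dot-or-allowed
lemma pv_all_parts (cs : List Char) :
    (pvSplitDot cs).all (fun part => part.all (fun c => pvAllowedNoDot.contains c))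
      = cs.all (fun c => c == '.' || pvAllowedNoDot.contains c) := by
  induction cs with
  | nil => simp [pvSplitDot]
  | cons c rest ih =>
    by_cases hc : c = '.'
    · subst hc
      rw [show pvSplitDot ('.' :: rest) = [] :: pvSplitDot rest from by simp [pvSplitDot]]
      simp only [List.all_cons, List.all_nil, Bool.true_and, beq_self_eq_true, Bool.true_or]
      exact ih
    · simp only [pvSplitDot, hc, if_false, List.all_cons]
      have hne : (c == '.') = false := by simp [hc]
      rw [hne, Bool.false_or, ← ih]
      cases h : pvSplitDot rest with
      | nil => exact absurd h (pvSplitDot_ne_nil rest)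
      | cons p ps => simp [pvPrepFirst, Bool.and_assoc]

-- per-char: membership in A's full allowed set = dot-or-(B's allowed-minus-dot)
lemma pv_mem_allowed (c : Char) :
    (PySem.Set.ofList
      "abcdefghijklmnopqrstuvwxyzABCDEFGHIJKLMNOPQRSTUVWXYZ0123456789._-".toList).contains c
      = (c == '.' || pvAllowedNoDot.contains c) := by
  have h : (PySem.Set.ofList
      "abcdefghijklmnopqrstuvwxyzABCDEFGHIJKLMNOPQRSTUVWXYZ0123456789._-".toList)
      = "abcdefghijklmnopqrstuvwxyzABCDEFGHIJKLMNOPQRSTUVWXYZ0123456789".toList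
        ++ '.' :: "_-".toList := by decide
  have h2 : pvAllowedNoDot
      = "abcdefghijklmnopqrstuvwxyzABCDEFGHIJKLMNOPQRSTUVWXYZ0123456789".toList
        ++ "_-".toList := by decide
  rw [PySem.Set.contains, h, h2]
  simp only [List.contains_append, List.contains_cons]
  cases hP : ("abcdefghijklmnopqrstuvwxyzABCDEFGHIJKLMNOPQRSTUVWXYZ0123456789".toList).contains c <;>
    cases hS : ("_-".toList).contains c <;>
    cases hd : ('.' == c) <;>
    simp [hP, hS, hd, BEq.comm]

-- take 1 vs first element: isdigit of normalized[:1]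
lemma pv_take_one (cs : List Char) :
    PySem.Chars.strIsdigit (cs.take 1)
      = (!cs.isEmpty
          && (match PySem.List.pyGet? cs 0 with
              | some c => PySem.Chars.isdigit c
              | none => false)) := by
  cases cs with
  | nil => simp [PySem.Chars.strIsdigit, PySem.List.pyGet?, PySem.List.pyIdx?]
  | cons c rest =>
    simp [PySem.Chars.strIsdigit, PySem.List.pyGet?, PySem.List.pyIdx?]

-- ===== VERDICT (by name: the statement is the Claim_ definition above) =====
theorem looks_like_version_suffix_py_spec : Claim_equal_looks_like_version_suffix_py := by
  intro value _
  unfold Spec_looks_like_version_suffix_py looks_like_version_suffix_py looks_like_version_suffix_py_alt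
  simp only [pv_splitOn_eq, pv_length_splitDot, pv_take_one, pv_stripChars_empty,
    pv_all_parts, pv_mem_allowed]
  generalize (PySem.Chars.strip value.toList).dropWhile (fun c => c == 'v' || c == 'V') = cs
  cases h1 : !cs.isEmpty <;>
    cases h2 : (match PySem.List.pyGet? cs 0 with
        | some c => PySem.Chars.isdigit c
        | none => false) <;>
    cases h3 : cs.contains '.' <;>
    cases h4 : cs.all (fun c => c == '.' || pvAllowedNoDot.contains c) <;>
    simp [h1, h2, h3, h4]
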